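-- pv_equiv track=rewrite | github.com/Dilmurod1992/python | lesson-6/homework/strings.py | insert_underscore
-- ===== SOURCE A (Python) =====
-- def insert_underscore(txt):
--     vowels = 'aeiouAEIOU'
--     result = []
--     i = 0
--     count = 0
--
--     while i < len(txt):
--         result.append(txt[i])
--         count += 1
--
--         if count == 3:
--
--             j = i + 1
--             while j < len(txt) and (txt[j] in vowels or txt[j] == '_'):
--                 j += 1
--             if j < len(txt):
--                 result.append('_')
--             count = 0
--         i += 1
--
--     if result and result[-1] == '_':
--         result.pop()
--
--     return ''.join(result)
-- ===== SOURCE B (Python) =====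
-- def insert_underscore(txt):
--     # Single backward pass: build the output reversed while tracking whether any
--     # "meaningful" (non-vowel, non-underscore) char occurs later in the string.
--     rev = []
--     flag = False
--     for i in range(len(txt) - 1, -1, -1):
--         c = txt[i]
--         if (i + 1) % 3 == 0 and flag:
--             rev.append('_')
--         rev.append(c)
--         flag = flag or (c not in 'aeiouAEIOU_')
--     if rev and rev[0] == '_':
--         rev = rev[1:]
--     rev.reverse()
--     return ''.join(rev)
-- ===== Notes on version B (the rewrite author's own statement) =====
-- stated objective: faster
-- what changed: Replaced A's forward loop that re-scans the remaining suffix after every 3rd character with a single backward pass that carries a 'meaningful character seen later' flag, building the output in reverse.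
import Mathlib
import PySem

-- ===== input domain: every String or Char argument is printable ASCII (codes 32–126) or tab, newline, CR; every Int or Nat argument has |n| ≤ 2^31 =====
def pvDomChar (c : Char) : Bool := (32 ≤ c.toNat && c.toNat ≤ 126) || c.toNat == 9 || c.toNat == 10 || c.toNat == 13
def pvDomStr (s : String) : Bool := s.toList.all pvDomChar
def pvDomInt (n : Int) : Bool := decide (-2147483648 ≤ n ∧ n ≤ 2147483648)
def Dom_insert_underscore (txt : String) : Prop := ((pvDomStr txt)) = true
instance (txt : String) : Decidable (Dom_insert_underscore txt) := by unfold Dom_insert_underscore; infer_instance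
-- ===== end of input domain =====

-- B replaces A's quadratic forward scan (re-scanning the suffix after every 3rd char)
-- by a single backward pass carrying a "meaningful char seen later" flag; objective: faster (asymptotic).

-- ===== PORT A =====
def iuVowels : List Char := "aeiouAEIOU".toList

-- inner `while j < len(txt) and (txt[j] in vowels or txt[j] == '_'): j += 1`
def iuInner (cs : List Char) (j : Nat) : Nat :=
  if h : j < cs.length ∧ (cs[j]! ∈ iuVowels ∨ cs[j]! = '_') then iuInner cs (j + 1) else j
termination_by cs.length - j
decreasing_by omega

-- outer while loop over i with counter `count` and accumulator `result`
def iuLoop (cs : List Char) (i count : Nat) (result : List Char) : List Char :=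
  if h : i < cs.length then
    let result1 := result ++ [cs[i]!]
    let count1 := count + 1
    if count1 == 3 then
      let j := iuInner cs (i + 1)
      let result2 := if j < cs.length then result1 ++ ['_'] else result1
      iuLoop cs (i + 1) 0 result2
    else iuLoop cs (i + 1) count1 result1
  else result
termination_by cs.length - i
decreasing_by all_goals omega

def insert_underscore (txt : String) : String :=
  let result := iuLoop txt.toList 0 0 []
  -- `if result and result[-1] == '_': result.pop()`
  let final :=
    match result.getLast? with
    | some c => if c = '_' then result.dropLast else result
    | none => result
  String.mk final

-- ===== PORT B =====
def iuMeaningful (c : Char) : Bool := !(c ∈ "aeiouAEIOU_".toList)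

-- `for i in range(len(txt)-1, -1, -1)`: k = i+1 counts down from len(txt) to 1
def iuLoopB (cs : List Char) : Nat → Bool → List Char → List Char
  | 0, _, rev => rev
  | k + 1, flag, rev =>
      let c := cs[k]!
      let rev1 := if (k + 1) % 3 == 0 && flag then rev ++ ['_'] else rev
      let rev2 := rev1 ++ [c]
      iuLoopB cs k (flag || iuMeaningful c) rev2

def insert_underscore_alt (txt : String) : String :=
  let cs := txt.toList
  let rev := iuLoopB cs cs.length false []
  -- `if rev and rev[0] == '_': rev = rev[1:]`
  let rev1 :=
    match rev with
    | c :: rest => if c = '_' then rest else rev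
    | [] => rev
  String.mk rev1.reverse

-- ===== PRECONDITION & SPEC =====
def Spec_insert_underscore (txt : String) (out : String) : Prop := out = insert_underscore_alt txt
instance (txt : String) (out : String) : Decidable (Spec_insert_underscore txt out) := by unfold Spec_insert_underscore; infer_instance

-- ===== CLAIM (what is proved, stated in full; the proofs are below) =====
def Claim_equal_insert_underscore : Prop := ∀ (txt : String), Dom_insert_underscore txt → Spec_insert_underscore txt (insert_underscore txt)

-- ===== LEMMAS AND PROOFS =====

-- the chunk emitted for index i: the char, then '_' iff i is a 3rd char and a meaningful char follows
def iuChunk (cs : List Char) (i : Nat) : List Char :=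
  cs[i]! :: (if (i + 1) % 3 == 0 && (cs.drop (i + 1)).any iuMeaningful then ['_'] else [])

-- the full (untrimmed) output for indices a, a+1, …, a+b-1
def iuOut (cs : List Char) (a b : Nat) : List Char :=
  (List.range' a b).flatMap (iuChunk cs)

theorem iuSkip_iff (c : Char) : (c ∈ iuVowels ∨ c = '_') ↔ iuMeaningful c = false := by
  simp [iuVowels, iuMeaningful]; tauto

-- A's inner scan exits early iff a meaningful char exists at index ≥ j
theorem iuInner_lt_iff (cs : List Char) (j : Nat) :
    decide (iuInner cs j < cs.length) = (cs.drop j).any iuMeaningful := by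
  by_cases hj : j < cs.length
  · have hget : cs[j]! = cs[j] := by
      simp [List.getElem!_eq_getElem?_getD, List.getElem?_eq_getElem hj]
    rw [List.drop_eq_getElem_cons hj, List.any_cons, iuInner, hget]
    by_cases hs : cs[j] ∈ iuVowels ∨ cs[j] = '_'
    · have hm : iuMeaningful cs[j] = false := (iuSkip_iff _).mp hs
      rw [dif_pos ⟨hj, hs⟩, iuInner_lt_iff cs (j + 1)]
      simp [hm]
    · have hm : iuMeaningful cs[j] = true := by
        cases h : iuMeaningful cs[j] with
        | true => rfl
        | false => exact absurd ((iuSkip_iff _).mpr h) hs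
      rw [dif_neg (by tauto)]
      simp [hj, hm]
  · have hdrop : cs.drop j = [] := List.drop_eq_nil_of_le (by omega)
    rw [iuInner]
    simp [hj, hdrop]
termination_by cs.length - j
decreasing_by omega

theorem iuOut_succ_right (cs : List Char) (a b : Nat) :
    iuOut cs a (b + 1) = iuOut cs a b ++ iuChunk cs (a + b) := by
  simp [iuOut, List.range'_concat, List.flatMap_append]

theorem iuOut_succ_left (cs : List Char) (a b : Nat) :
    iuOut cs a (b + 1) = iuChunk cs a ++ iuOut cs (a + 1) b := by
  simp [iuOut, List.range'_succ]

-- A's outer loop appends exactly the chunks for the remaining indices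
theorem iuLoop_eq (cs : List Char) (i : Nat) (result : List Char)
    (hc : i ≤ cs.length) :
    iuLoop cs i (i % 3) result = result ++ iuOut cs i (cs.length - i) := by
  by_cases hi : i < cs.length
  · have hstep : cs.length - i = (cs.length - (i + 1)) + 1 := by omega
    rw [hstep, iuOut_succ_left, iuLoop, dif_pos hi]
    by_cases h3 : (i + 1) % 3 = 0
    · have h2 : i % 3 = 2 := by omega
      rw [if_pos (by simp [h2] : ((i % 3 + 1 == 3) = true))]
      rw [show (0 : Nat) = (i + 1) % 3 by omega, iuLoop_eq cs (i + 1) _ (by omega)]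
      simp only [iuChunk, h3]
      rw [← iuInner_lt_iff]
      by_cases hlt : iuInner cs (i + 1) < cs.length <;>
        simp [hlt, List.append_assoc]
    · have h2 : i % 3 ≠ 2 := by omega
      rw [if_neg (by simp; omega)]
      rw [show i % 3 + 1 = (i + 1) % 3 by omega, iuLoop_eq cs (i + 1) _ (by omega)]
      simp [iuChunk, h3, List.append_assoc]
  · have hieq : i = cs.length := by omega
    rw [iuLoop]
    simp [hieq, iuOut]
termination_by cs.length - i
decreasing_by all_goals omega

-- B's backward loop builds the reverse of the same chunks for indices < k
theorem iuLoopB_eq (cs : List Char) (k : Nat) (rev : List Char)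
    (hk : k ≤ cs.length) :
    iuLoopB cs k ((cs.drop k).any iuMeaningful) rev = rev ++ (iuOut cs 0 k).reverse := by
  induction k generalizing rev with
  | zero => simp [iuLoopB, iuOut]
  | succ k ih =>
      have hklt : k < cs.length := by omega
      have hdrop : cs.drop k = cs[k] :: cs.drop (k + 1) := List.drop_eq_getElem_cons hklt
      have hget : cs[k]! = cs[k] := by
        simp [List.getElem!_eq_getElem?_getD, List.getElem?_eq_getElem hklt]
      rw [iuLoopB]
      have hflag : ((cs.drop (k + 1)).any iuMeaningful || iuMeaningful cs[k]!) =
          (cs.drop k).any iuMeaningful := by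
        rw [hdrop, hget, List.any_cons]
        exact Bool.or_comm _ _
      rw [hflag, ih _ (by omega)]
      have hout : iuOut cs 0 (k + 1) = iuOut cs 0 k ++ iuChunk cs k := by
        simpa using iuOut_succ_right cs 0 k
      rw [hout, List.reverse_append]
      simp only [iuChunk, List.reverse_cons, hget]
      by_cases h3 : (k + 1) % 3 = 0 <;>
        by_cases hm : (cs.drop (k + 1)).any iuMeaningful = true <;>
          try simp [h3, hm, List.append_assoc]

-- the trims agree: dropping a trailing '_' forwards = dropping a leading '_' of the reverse
theorem trim_eq (l : List Char) :
    (match l.getLast? with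
      | some c => if c = '_' then l.dropLast else l
      | none => l) =
    ((match l.reverse with
      | c :: rest => if c = '_' then rest else l.reverse
      | [] => l.reverse)).reverse := by
  rcases List.eq_nil_or_concat l with h | ⟨l', a, h⟩
  · simp [h]
  · subst h
    by_cases ha : a = '_' <;> simp [ha]

-- ===== VERDICT (by name: the statement is the Claim_ definition above) =====
theorem insert_underscore_spec : Claim_equal_insert_underscore := by
  intro txt _
  unfold Spec_insert_underscore insert_underscore insert_underscore_alt
  set cs := txt.toList with hcs
  have hA : iuLoop cs 0 0 [] = iuOut cs 0 cs.length := by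
    have := iuLoop_eq cs 0 [] (by omega)
    simpa using this
  have hB : iuLoopB cs cs.length false [] = (iuOut cs 0 cs.length).reverse := by
    have hfl : ((cs.drop cs.length).any iuMeaningful) = false := by
      simp [List.drop_eq_nil_of_le (le_refl cs.length)]
    have := iuLoopB_eq cs cs.length [] (le_refl _)
    rw [hfl] at this
    simpa using this
  simp only [hA, hB]
  exact congrArg String.mk (trim_eq (iuOut cs 0 cs.length))
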